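-- pv_equiv track=rewrite | github.com/nikita-panacea/pci-compliance-map | pci-roc-app.py | aggregate_mappings
-- ===== SOURCE A (Python) =====
-- def aggregate_mappings(mappings: list) -> dict:
--     """
--     Aggregate mapping dictionaries from each relevant chunk into a deduplicated dict keyed by control code.
--     For duplicate control codes, merge the explanations.
--     """
--     aggregated = {}
--     for mapping in mappings:
--         code = mapping.get("control_code")
--         if not code:
--             continue
--         if code in aggregated:
--             existing_expl = aggregated[code]["explanation"]
--             new_expl = mapping.get("explanation", "")
--             if new_expl and new_expl not in existing_expl:
--                 aggregated[code]["explanation"] += " " + new_expl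
--         else:
--             aggregated[code] = {
--                 "description": mapping.get("description", ""),
--                 "explanation": mapping.get("explanation", "")
--             }
--     return aggregated
-- ===== SOURCE B (Python) =====
-- def aggregate_mappings(mappings: list) -> dict:
--     """Group mappings by control code first, then build each merged entry in one fold."""
--     groups = {}
--     for mapping in mappings:
--         code = mapping.get("control_code")
--         if code:
--             groups.setdefault(code, []).append(mapping)
--     result = {}
--     for code, group in groups.items():
--         first = group[0]
--         expl = first.get("explanation", "")
--         for mapping in group[1:]:
--             new_expl = mapping.get("explanation", "")
--             if new_expl and new_expl not in expl:
--                 expl += " " + new_expl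
--         result[code] = {
--             "description": first.get("description", ""),
--             "explanation": expl,
--         }
--     return result
-- ===== Notes on version B (the rewrite author's own statement) =====
-- stated objective: alternative
-- what changed: B replaces A's single interleaved fold that mutates a growing dict-of-dicts per mapping with a two-phase decomposition: first group mappings by control code in first-occurrence order, then build each merged entry independently by folding the explanation merge over its group.
import Mathlib
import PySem

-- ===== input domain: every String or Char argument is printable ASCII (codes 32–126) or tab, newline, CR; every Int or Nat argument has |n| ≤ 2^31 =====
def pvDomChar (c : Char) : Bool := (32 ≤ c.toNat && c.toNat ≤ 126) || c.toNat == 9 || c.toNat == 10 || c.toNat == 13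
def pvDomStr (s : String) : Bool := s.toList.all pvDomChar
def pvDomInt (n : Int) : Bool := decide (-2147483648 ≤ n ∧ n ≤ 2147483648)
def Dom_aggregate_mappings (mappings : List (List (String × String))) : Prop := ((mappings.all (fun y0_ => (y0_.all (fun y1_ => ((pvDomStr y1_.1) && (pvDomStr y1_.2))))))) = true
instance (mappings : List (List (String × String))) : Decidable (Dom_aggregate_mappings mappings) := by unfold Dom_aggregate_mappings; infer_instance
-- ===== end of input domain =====

-- B regroups the work: one pass groups mappings by control code, a second pass folds each
-- group into its merged entry; same return value as A's single mutate-as-you-go pass.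

-- ===== PORT A =====
-- one iteration of A's loop over `mappings` (state: the `aggregated` dict of dicts)
def aggStep (d : PySem.Dict String (PySem.Dict String String))
    (mapping : List (String × String)) : PySem.Dict String (PySem.Dict String String) :=
  -- code = mapping.get("control_code"); `if not code` merges None and "" (both falsy)
  let code := (PySem.Dict.mk mapping).getD "control_code" ""
  if code = "" then d
  else if d.contains code then
    let existing_expl := (d.getD code (PySem.Dict.mk [])).getD "explanation" ""
    let new_expl := (PySem.Dict.mk mapping).getD "explanation" ""
    if new_expl ≠ "" ∧ PySem.Str.isIn new_expl existing_expl = false then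
      -- aggregated[code]["explanation"] += " " + new_expl
      d.modify code (PySem.Dict.mk []) (fun e => e.modify "explanation" "" (fun x => x ++ " " ++ new_expl))
    else d
  else
    d.insert code (PySem.Dict.mk
      [("description", (PySem.Dict.mk mapping).getD "description" ""),
       ("explanation", (PySem.Dict.mk mapping).getD "explanation" "")])

def aggregate_mappings (mappings : List (List (String × String))) : List (String × List (String × String)) :=
  ((mappings.foldl aggStep PySem.Dict.empty).items.map (fun p => (p.1, p.2.items)))

-- ===== PORT B =====
-- groups.setdefault(code, []).append(mapping)  (d[k] = d.get(k, []) + [mapping], key kept in place)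
def grpStep (g : PySem.Dict String (List (List (String × String))))
    (mapping : List (String × String)) : PySem.Dict String (List (List (String × String))) :=
  let code := (PySem.Dict.mk mapping).getD "control_code" ""
  if code = "" then g else g.modify code [] (· ++ [mapping])

-- inner loop of B's second pass: merge one mapping's explanation into the accumulator
def mergeExpl (expl : String) (mapping : List (String × String)) : String :=
  let new_expl := (PySem.Dict.mk mapping).getD "explanation" ""
  if new_expl ≠ "" ∧ PySem.Str.isIn new_expl expl = false then expl ++ " " ++ new_expl else expl

-- one iteration of B's second pass: result[code] = {...} built from the group
-- (a group is never empty; the [] case skips, Python's group[0] never sees it)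
def buildStep (out : PySem.Dict String (PySem.Dict String String))
    (p : String × List (List (String × String))) : PySem.Dict String (PySem.Dict String String) :=
  match p.2 with
  | [] => out
  | first :: rest =>
    out.insert p.1 (PySem.Dict.mk
      [("description", (PySem.Dict.mk first).getD "description" ""),
       ("explanation", rest.foldl mergeExpl ((PySem.Dict.mk first).getD "explanation" ""))])

def aggregate_mappings_alt (mappings : List (List (String × String))) : List (String × List (String × String)) :=
  let groups := mappings.foldl grpStep PySem.Dict.empty
  (((groups.items.foldl buildStep PySem.Dict.empty)).items.map (fun p => (p.1, p.2.items)))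

-- ===== PRECONDITION & SPEC =====
def Spec_aggregate_mappings (mappings : List (List (String × String))) (out : List (String × List (String × String))) : Prop := out = aggregate_mappings_alt mappings
instance (mappings : List (List (String × String))) (out : List (String × List (String × String))) : Decidable (Spec_aggregate_mappings mappings out) := by unfold Spec_aggregate_mappings; infer_instance

-- ===== CLAIM (what is proved, stated in full; the proofs are below) =====
def Claim_equal_aggregate_mappings : Prop := ∀ (mappings : List (List (String × String))), Dom_aggregate_mappings mappings → Spec_aggregate_mappings mappings (aggregate_mappings mappings)

-- ===== LEMMAS AND PROOFS =====

-- the merged entry a (nonempty) group denotes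
def entryD (ms : List (List (String × String))) : PySem.Dict String String :=
  match ms with
  | [] => PySem.Dict.mk []
  | first :: rest =>
    PySem.Dict.mk
      [("description", (PySem.Dict.mk first).getD "description" ""),
       ("explanation", rest.foldl mergeExpl ((PySem.Dict.mk first).getD "explanation" ""))]

-- A's aggregated dict, reconstructed from the groups dict
def renderD (g : PySem.Dict String (List (List (String × String)))) : PySem.Dict String (PySem.Dict String String) :=
  PySem.Dict.mk (g.items.map (fun p => (p.1, entryD p.2)))

theorem keys_renderD (g : PySem.Dict String (List (List (String × String)))) :
    (renderD g).keys = g.keys := by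
  simp [renderD, PySem.Dict.keys]

theorem entryD_append (f : List (String × String)) (r : List (List (String × String)))
    (m : List (String × String)) :
    entryD ((f :: r) ++ [m]) = PySem.Dict.mk
      [("description", (PySem.Dict.mk f).getD "description" ""),
       ("explanation", mergeExpl ((r.foldl mergeExpl ((PySem.Dict.mk f).getD "explanation" ""))) m)] := by
  simp [entryD, List.foldl_append]

theorem getD_expl_entryD (f : List (String × String)) (r : List (List (String × String))) :
    (entryD (f :: r)).getD "explanation" "" = r.foldl mergeExpl ((PySem.Dict.mk f).getD "explanation" "") := by
  rfl

theorem modify_expl_entryD (f : List (String × String)) (r : List (List (String × String))) (h : String → String) :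
    (entryD (f :: r)).modify "explanation" "" h = PySem.Dict.mk
      [("description", (PySem.Dict.mk f).getD "description" ""),
       ("explanation", h (r.foldl mergeExpl ((PySem.Dict.mk f).getD "explanation" "")))] := by
  rfl

theorem nodup_keys_grpStep (g : PySem.Dict String (List (List (String × String))))
    (m : List (String × String)) (h : g.keys.Nodup) : (grpStep g m).keys.Nodup := by
  simp only [grpStep]
  split
  · exact h
  · exact PySem.Dict.nodup_keys_insert _ _ _ h

theorem nonempty_grpStep (g : PySem.Dict String (List (List (String × String))))
    (m : List (String × String)) (h : ∀ p ∈ g.items, p.2 ≠ []) :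
    ∀ p ∈ (grpStep g m).items, p.2 ≠ [] := by
  simp only [grpStep]
  split
  · exact h
  · intro p hp
    rcases (PySem.Dict.mem_items_insert _ _ _ p).mp hp with h1 | h2
    · subst h1; simp
    · exact h p h2.1

-- one step: A's update of the rendered dict is the rendering of B's group update
theorem step_render (g : PySem.Dict String (List (List (String × String))))
    (m : List (String × String)) (hnd : g.keys.Nodup) (hne : ∀ p ∈ g.items, p.2 ≠ []) :
    aggStep (renderD g) m = renderD (grpStep g m) := by
  unfold aggStep grpStep
  by_cases hc : (PySem.Dict.mk m).getD "control_code" "" = ""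
  · simp [hc]
  · simp only [hc, if_false]
    set c := (PySem.Dict.mk m).getD "control_code" "" with hcdef
    have hkeys : (renderD g).contains c = g.contains c := by
      classical
      rw [PySem.Dict.contains_eq_decide_mem_keys, PySem.Dict.contains_eq_decide_mem_keys, keys_renderD]
    by_cases hcon : g.contains c = true
    · -- key already present: the unique group at c is f :: r
      have hmemk : c ∈ g.keys := by
        classical
        rw [PySem.Dict.contains_eq_decide_mem_keys] at hcon
        exact of_decide_eq_true hcon
      obtain ⟨ms, hms⟩ : ∃ ms, (c, ms) ∈ g.items := by
        simp only [PySem.Dict.keys, List.mem_map] at hmemk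
        obtain ⟨p, hp, hpe⟩ := hmemk
        exact ⟨p.2, by rw [← hpe]; simpa using hp⟩
      have hget : g.get? c = some ms := PySem.Dict.get?_of_mem_items g hms hnd
      obtain ⟨f, r, hfr⟩ : ∃ f r, ms = f :: r := by
        cases hmse : ms with
        | nil => exact absurd (hmse ▸ hne _ hms) (by simp)
        | cons f r => exact ⟨f, r, rfl⟩
      subst hfr
      have hgetR : (renderD g).get? c = some (entryD (f :: r)) := by
        apply PySem.Dict.get?_of_mem_items
        · simp only [renderD, List.mem_map]
          exact ⟨(c, f :: r), hms, rfl⟩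
        · rw [keys_renderD]; exact hnd
      have hgetDR : (renderD g).getD c (PySem.Dict.mk []) = entryD (f :: r) :=
        PySem.Dict.getD_of_get?_eq_some _ _ hgetR
      have hgetDG : g.getD c [] = f :: r := PySem.Dict.getD_of_get?_eq_some _ _ hget
      simp only [hkeys, hcon, if_true, hgetDR, getD_expl_entryD]
      -- both sides are an overwrite of the value at key c
      have hmod : ∀ (v : PySem.Dict String String),
          (renderD g).modify c (PySem.Dict.mk []) (fun _ => v) = (renderD g).insert c v := by
        intro v; rfl
      set E := r.foldl mergeExpl ((PySem.Dict.mk f).getD "explanation" "") with hE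
      set ne := (PySem.Dict.mk m).getD "explanation" "" with hne'
      have hconR : (renderD g).contains c = true := by rw [hkeys]; exact hcon
      have key_items : ∀ (v : PySem.Dict String String),
          ((renderD g).insert c v).items = g.items.map
            (fun p => if (p.1 == c) = true then (c, v) else (p.1, entryD p.2)) := by
        intro v
        rw [PySem.Dict.items_insert_of_contains _ _ hconR]
        simp only [renderD, List.map_map]
        apply List.map_congr_left
        intro p _; rfl
      have rhs_items : ∀ (ms' : List (List (String × String))),
          (renderD (g.insert c ms')).items = g.items.map
            (fun p => if (p.1 == c) = true then (c, entryD ms') else (p.1, entryD p.2)) := by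
        intro ms'
        simp only [renderD]
        rw [PySem.Dict.items_insert_of_contains _ _ hcon]
        rw [List.map_map]
        apply List.map_congr_left
        intro p hp
        by_cases hp1 : (p.1 == c) = true
        · simp only [Function.comp_apply, hp1, if_true]
        · simp only [Bool.not_eq_true] at hp1
          simp only [Function.comp_apply, hp1, Bool.false_eq_true, if_false]
      have hgroup_eq : ∀ p ∈ g.items, (p.1 == c) = true → p.2 = f :: r := by
        intro p hp hpc
        have : g.get? p.1 = some p.2 := by
          apply PySem.Dict.get?_of_mem_items g _ hnd
          exact (by cases p; exact hp)
        rw [eq_of_beq hpc, hget] at this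
        exact (Option.some.inj this).symm
      -- modify on the groups side appends m to the unique group at c
      have hmodG : g.modify c [] (· ++ [m]) = g.insert c ((f :: r) ++ [m]) := by
        show g.insert c (g.getD c [] ++ [m]) = _
        rw [hgetDG]
      rw [hmodG]
      by_cases hcond : ne ≠ "" ∧ PySem.Str.isIn ne E = false
      · rw [if_pos hcond]
        apply PySem.Dict.ext
        have : ((renderD g).modify c (PySem.Dict.mk [])
            (fun e => e.modify "explanation" "" (fun x => x ++ " " ++ ne))) =
            (renderD g).insert c ((entryD (f :: r)).modify "explanation" "" (fun x => x ++ " " ++ ne)) := by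
          show (renderD g).insert c (((renderD g).getD c (PySem.Dict.mk [])).modify "explanation" "" _) = _
          rw [hgetDR]
        rw [this, key_items, rhs_items]
        apply List.map_congr_left
        intro p hp
        by_cases hp1 : (p.1 == c) = true
        · simp only [hp1, if_true]
          rw [modify_expl_entryD, entryD_append]
          have hME : mergeExpl E m = E ++ " " ++ ne := by
            show (if ne ≠ "" ∧ PySem.Str.isIn ne E = false then E ++ " " ++ ne else E) = E ++ " " ++ ne
            rw [if_pos hcond]
          rw [← hE, hME]
        · simp [hp1]
      · rw [if_neg hcond]
        apply PySem.Dict.ext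
        rw [rhs_items]
        have hEnt : entryD ((f :: r) ++ [m]) = entryD (f :: r) := by
          rw [entryD_append]
          have hME : mergeExpl E m = E := by
            show (if ne ≠ "" ∧ PySem.Str.isIn ne E = false then E ++ " " ++ ne else E) = E
            rw [if_neg hcond]
          rw [← hE, hME]; rfl
        simp only [hEnt, renderD]
        apply List.map_congr_left
        intro p hp
        by_cases hp1 : (p.1 == c) = true
        · simp only [hp1, if_true]
          rw [hgroup_eq p hp hp1, eq_of_beq hp1]
        · simp [hp1]
    · -- new key: both sides append
      have hconR : (renderD g).contains c = false := by
        rw [hkeys]; exact eq_false_of_ne_true hcon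
      have hcon' : g.contains c = false := eq_false_of_ne_true hcon
      simp only [hkeys, hcon', Bool.false_eq_true, if_false]
      have hmodG : g.modify c [] (· ++ [m]) = g.insert c [m] := by
        show g.insert c (g.getD c [] ++ [m]) = _
        rw [PySem.Dict.getD_of_not_contains _ _ hcon']
        rfl
      rw [hmodG]
      apply PySem.Dict.ext
      rw [PySem.Dict.items_insert_of_not_contains _ _ hconR]
      simp only [renderD]
      rw [PySem.Dict.items_insert_of_not_contains _ _ hcon']
      simp [entryD]

-- the whole of A's loop, started from any rendered groups dict
theorem fold_render (l : List (List (String × String)))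
    (g : PySem.Dict String (List (List (String × String))))
    (hnd : g.keys.Nodup) (hne : ∀ p ∈ g.items, p.2 ≠ []) :
    l.foldl aggStep (renderD g) = renderD (l.foldl grpStep g) := by
  induction l generalizing g with
  | nil => rfl
  | cons m l ih =>
    simp only [List.foldl_cons]
    rw [step_render g m hnd hne]
    exact ih _ (nodup_keys_grpStep g m hnd) (nonempty_grpStep g m hne)

theorem nodup_keys_groups (l : List (List (String × String)))
    (g : PySem.Dict String (List (List (String × String)))) (hnd : g.keys.Nodup) :
    (l.foldl grpStep g).keys.Nodup := by
  induction l generalizing g with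
  | nil => exact hnd
  | cons m l ih => exact ih _ (nodup_keys_grpStep g m hnd)

theorem nonempty_groups (l : List (List (String × String)))
    (g : PySem.Dict String (List (List (String × String))))
    (hne : ∀ p ∈ g.items, p.2 ≠ []) :
    ∀ p ∈ (l.foldl grpStep g).items, p.2 ≠ [] := by
  induction l generalizing g with
  | nil => exact hne
  | cons m l ih => exact ih _ (nonempty_grpStep g m hne)

-- B's second pass rebuilds exactly the rendered groups dict
theorem build_eq_render (g : PySem.Dict String (List (List (String × String))))
    (hnd : g.keys.Nodup) (hne : ∀ p ∈ g.items, p.2 ≠ []) :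
    g.items.foldl buildStep PySem.Dict.empty = renderD g := by
  have hstep : ∀ (out : PySem.Dict String (PySem.Dict String String)),
      ∀ p ∈ g.items, buildStep out p = out.insert p.1 (entryD p.2) := by
    intro out p hp
    cases hms : p.2 with
    | nil => exact absurd (hms ▸ hne p hp) (by simp)
    | cons f r => simp [buildStep, hms, entryD]
  rw [PySem.List.foldl_congr_mem g.items buildStep (fun out p => out.insert p.1 (entryD p.2)) _ hstep]
  apply PySem.Dict.ext
  rw [PySem.Dict.items_foldl_insert_fresh g.items (fun p => p.1) (fun p => entryD p.2) PySem.Dict.empty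
    (by intro a _; rfl) (by simpa [PySem.Dict.keys] using hnd)]
  simp [renderD, PySem.Dict.empty]

-- ===== VERDICT (by name: the statement is the Claim_ definition above) =====
theorem aggregate_mappings_spec : Claim_equal_aggregate_mappings := by
  intro mappings _
  have hnd0 : (PySem.Dict.empty : PySem.Dict String (List (List (String × String)))).keys.Nodup := by
    simp [PySem.Dict.keys, PySem.Dict.empty]
  have hne0 : ∀ p ∈ (PySem.Dict.empty : PySem.Dict String (List (List (String × String)))).items, p.2 ≠ [] := by
    simp [PySem.Dict.empty]
  have h1 : mappings.foldl aggStep PySem.Dict.empty = renderD (mappings.foldl grpStep PySem.Dict.empty) :=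
    fold_render mappings PySem.Dict.empty hnd0 hne0
  have h2 : (mappings.foldl grpStep PySem.Dict.empty).items.foldl buildStep PySem.Dict.empty
      = renderD (mappings.foldl grpStep PySem.Dict.empty) :=
    build_eq_render _ (nodup_keys_groups mappings _ hnd0) (nonempty_groups mappings _ hne0)
  show (mappings.foldl aggStep PySem.Dict.empty).items.map (fun p => (p.1, p.2.items))
      = ((mappings.foldl grpStep PySem.Dict.empty).items.foldl buildStep PySem.Dict.empty).items.map (fun p => (p.1, p.2.items))
  rw [h1, h2]
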